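-- pv_equiv track=rewrite | github.com/vaiteaopuu/rna_design_biophy_ml | src/struct.py | remove_sec_3D
-- ===== SOURCE A (Python) =====
-- def remove_sec_3D(pair_sec, pair_tri):
--     tmp = []
--     for pi, pj in pair_tri:
--         if (pi, pj) not in pair_sec and\
--            (pi-1, pj) not in pair_sec and\
--            (pi-2, pj) not in pair_sec and\
--            (pi, pj+1) not in pair_sec and\
--            (pi, pj+2) not in pair_sec:
--             tmp += [(pi, pj)]
--     return tmp
-- ===== SOURCE B (Python) =====
-- def remove_sec_3D(pair_sec, pair_tri):
--     forbidden = set()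
--     for si, sj in pair_sec:
--         forbidden.add((si, sj))
--         forbidden.add((si + 1, sj))
--         forbidden.add((si + 2, sj))
--         forbidden.add((si, sj - 1))
--         forbidden.add((si, sj - 2))
--     return [(pi, pj) for pi, pj in pair_tri if (pi, pj) not in forbidden]
-- ===== Notes on version B (the rewrite author's own statement) =====
-- stated objective: faster
-- what changed: Inverts the computation: precomputes a hash set of the five blocked positions induced by each secondary pair, then filters the tertiary pairs with a single O(1) membership test each, instead of five linear scans of pair_sec per tertiary pair.
import Mathlib
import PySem

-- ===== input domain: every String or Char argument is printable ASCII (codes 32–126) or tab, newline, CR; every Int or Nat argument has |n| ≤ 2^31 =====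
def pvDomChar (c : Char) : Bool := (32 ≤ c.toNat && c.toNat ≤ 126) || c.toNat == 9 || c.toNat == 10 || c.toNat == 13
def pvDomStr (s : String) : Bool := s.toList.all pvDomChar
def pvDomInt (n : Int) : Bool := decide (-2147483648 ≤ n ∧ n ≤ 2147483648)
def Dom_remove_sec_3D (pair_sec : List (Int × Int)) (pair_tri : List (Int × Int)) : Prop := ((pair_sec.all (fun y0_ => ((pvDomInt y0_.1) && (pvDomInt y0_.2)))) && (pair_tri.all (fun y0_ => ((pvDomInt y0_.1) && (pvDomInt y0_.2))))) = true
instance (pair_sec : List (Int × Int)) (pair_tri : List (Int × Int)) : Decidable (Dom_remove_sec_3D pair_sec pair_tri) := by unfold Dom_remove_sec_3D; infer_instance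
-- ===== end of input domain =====

-- B replaces A's five linear scans of pair_sec per tertiary pair by a precomputed
-- set of blocked positions and one membership test per tertiary pair (objective: faster).

-- ===== PORT A =====
def remove_sec_3D (pair_sec : List (Int × Int)) (pair_tri : List (Int × Int)) : List (Int × Int) :=
  pair_tri.foldl (fun tmp p =>
    if (p.1, p.2) ∉ pair_sec ∧ (p.1 - 1, p.2) ∉ pair_sec ∧ (p.1 - 2, p.2) ∉ pair_sec ∧
       (p.1, p.2 + 1) ∉ pair_sec ∧ (p.1, p.2 + 2) ∉ pair_sec
    then tmp ++ [(p.1, p.2)] else tmp) []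

-- ===== PORT B =====
def forbidden_remove_sec_3D (pair_sec : List (Int × Int)) : PySem.Set (Int × Int) :=
  pair_sec.foldl (fun s q =>
    PySem.Set.add (PySem.Set.add (PySem.Set.add (PySem.Set.add (PySem.Set.add s
      (q.1, q.2)) (q.1 + 1, q.2)) (q.1 + 2, q.2)) (q.1, q.2 - 1)) (q.1, q.2 - 2))
    PySem.Set.empty

def remove_sec_3D_alt (pair_sec : List (Int × Int)) (pair_tri : List (Int × Int)) : List (Int × Int) :=
  pair_tri.filter (fun p => !(PySem.Set.contains (forbidden_remove_sec_3D pair_sec) (p.1, p.2)))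

-- ===== PRECONDITION & SPEC =====
def Spec_remove_sec_3D (pair_sec : List (Int × Int)) (pair_tri : List (Int × Int)) (out : List (Int × Int)) : Prop := out = remove_sec_3D_alt pair_sec pair_tri
instance (pair_sec : List (Int × Int)) (pair_tri : List (Int × Int)) (out : List (Int × Int)) : Decidable (Spec_remove_sec_3D pair_sec pair_tri out) := by unfold Spec_remove_sec_3D; infer_instance

-- ===== CLAIM (what is proved, stated in full; the proofs are below) =====
def Claim_equal_remove_sec_3D : Prop := ∀ (pair_sec : List (Int × Int)) (pair_tri : List (Int × Int)), Dom_remove_sec_3D pair_sec pair_tri → Spec_remove_sec_3D pair_sec pair_tri (remove_sec_3D pair_sec pair_tri)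

-- ===== LEMMAS AND PROOFS =====

-- the blocked-position set holds exactly the five positions each secondary pair kills
theorem mem_forbidden (pair_sec : List (Int × Int)) (p : Int × Int) :
    p ∈ forbidden_remove_sec_3D pair_sec ↔
      ∃ q ∈ pair_sec, p = (q.1, q.2) ∨ p = (q.1 + 1, q.2) ∨ p = (q.1 + 2, q.2) ∨
        p = (q.1, q.2 - 1) ∨ p = (q.1, q.2 - 2) := by
  unfold forbidden_remove_sec_3D
  induction pair_sec using List.reverseRecOn with
  | nil => simp [PySem.Set.empty]
  | append_singleton xs x ih =>
      simp only [List.foldl_append, List.foldl_cons, List.foldl_nil, PySem.Set.mem_add, ih]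
      constructor
      · rintro (((((⟨q, hq, h⟩ | h) | h) | h) | h) | h)
        · exact ⟨q, List.mem_append_left _ hq, h⟩
        all_goals exact ⟨x, List.mem_append_right _ (List.mem_singleton.2 rfl), by tauto⟩
      · rintro ⟨q, hq, h⟩
        rcases List.mem_append.1 hq with hq | hq
        · exact Or.inl (Or.inl (Or.inl (Or.inl (Or.inl ⟨q, hq, h⟩))))
        · rw [List.mem_singleton] at hq; subst hq; tauto

-- membership in the blocked set is exactly A's five-scan test (negated)
theorem contains_forbidden (pair_sec : List (Int × Int)) (a b : Int) :
    PySem.Set.contains (forbidden_remove_sec_3D pair_sec) (a, b) = true ↔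
      (a, b) ∈ pair_sec ∨ (a - 1, b) ∈ pair_sec ∨ (a - 2, b) ∈ pair_sec ∨
      (a, b + 1) ∈ pair_sec ∨ (a, b + 2) ∈ pair_sec := by
  rw [PySem.Set.contains_iff, mem_forbidden]
  constructor
  · rintro ⟨⟨x, y⟩, hq, h⟩
    simp only [Prod.mk.injEq] at h
    rcases h with ⟨h1, h2⟩ | ⟨h1, h2⟩ | ⟨h1, h2⟩ | ⟨h1, h2⟩ | ⟨h1, h2⟩ <;> subst h1 <;> subst h2
    · exact Or.inl hq
    · refine Or.inr (Or.inl ?_); simpa using hq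
    · refine Or.inr (Or.inr (Or.inl ?_)); simpa using hq
    · refine Or.inr (Or.inr (Or.inr (Or.inl ?_))); simpa using hq
    · refine Or.inr (Or.inr (Or.inr (Or.inr ?_))); simpa using hq
  · rintro (h | h | h | h | h)
    · exact ⟨(a, b), h, Or.inl rfl⟩
    · exact ⟨(a - 1, b), h, Or.inr (Or.inl (by simp))⟩
    · exact ⟨(a - 2, b), h, Or.inr (Or.inr (Or.inl (by simp)))⟩
    · exact ⟨(a, b + 1), h, Or.inr (Or.inr (Or.inr (Or.inl (by simp))))⟩
    · exact ⟨(a, b + 2), h, Or.inr (Or.inr (Or.inr (Or.inr (by simp))))⟩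

theorem remove_sec_3D_eq (pair_sec pair_tri : List (Int × Int)) :
    remove_sec_3D pair_sec pair_tri = remove_sec_3D_alt pair_sec pair_tri := by
  unfold remove_sec_3D remove_sec_3D_alt
  rw [show (fun tmp (p : Int × Int) =>
      if (p.1, p.2) ∉ pair_sec ∧ (p.1 - 1, p.2) ∉ pair_sec ∧ (p.1 - 2, p.2) ∉ pair_sec ∧
         (p.1, p.2 + 1) ∉ pair_sec ∧ (p.1, p.2 + 2) ∉ pair_sec
      then tmp ++ [(p.1, p.2)] else tmp) =
    (fun tmp (p : Int × Int) =>
      if !(PySem.Set.contains (forbidden_remove_sec_3D pair_sec) (p.1, p.2))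
      then tmp ++ [p] else tmp) from ?_]
  · exact PySem.List.foldl_append_if_eq_filter _ pair_tri []
  · funext tmp p
    by_cases hc : PySem.Set.contains (forbidden_remove_sec_3D pair_sec) (p.1, p.2) = true
    · have := (contains_forbidden pair_sec p.1 p.2).1 hc
      rw [hc, if_neg (by tauto)]; simp
    · have h5 := mt (contains_forbidden pair_sec p.1 p.2).2 hc
      push_neg at h5
      rw [if_pos ⟨h5.1, h5.2.1, h5.2.2.1, h5.2.2.2.1, h5.2.2.2.2⟩]
      simp
      exact fun hmem => hc ((PySem.Set.contains_iff _ _).2 hmem)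

-- ===== VERDICT (by name: the statement is the Claim_ definition above) =====
theorem remove_sec_3D_spec : Claim_equal_remove_sec_3D := by
  intro ps pt _
  exact remove_sec_3D_eq ps pt
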